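-- pv_equiv track=rewrite | github.com/C-Kernel-Engine/C-Kernel-Engine | version/v7/scripts/check_backprop_plumbing_v7.py | _shape_numel
-- ===== SOURCE A (Python) =====
-- from typing import Any, Dict, Iterable, List, Optional, Set, Tuple
--
-- def _shape_numel(shape: Any) -> Optional[int]:
--     if not isinstance(shape, list) or not shape:
--         return None
--     n = 1
--     for d in shape:
--         if not isinstance(d, int) or d <= 0:
--             return None
--         n *= d
--     return int(n)
-- ===== SOURCE B (Python) =====
-- from typing import Any, Optional
--
--
-- def _numel_rec(ds, lo, hi):
--     # product of ds[lo:hi] (None if some entry is not a positive int); always called with lo < hi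
--     if hi - lo <= 1:
--         d = ds[lo]
--         return d if isinstance(d, int) and d > 0 else None
--     mid = (lo + hi) // 2
--     left = _numel_rec(ds, lo, mid)
--     if left is None:
--         return None
--     right = _numel_rec(ds, mid, hi)
--     return None if right is None else left * right
--
--
-- def _shape_numel(shape: Any) -> Optional[int]:
--     if not isinstance(shape, list) or not shape:
--         return None
--     return _numel_rec(shape, 0, len(shape))
-- ===== Notes on version B (the rewrite author's own statement) =====
-- stated objective: alternative
-- what changed: Replaces A's single left-to-right validation+accumulation loop by a divide-and-conquer recursion that splits the index range in half, validates/multiplies each half independently and combines the partial products.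
import Mathlib
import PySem

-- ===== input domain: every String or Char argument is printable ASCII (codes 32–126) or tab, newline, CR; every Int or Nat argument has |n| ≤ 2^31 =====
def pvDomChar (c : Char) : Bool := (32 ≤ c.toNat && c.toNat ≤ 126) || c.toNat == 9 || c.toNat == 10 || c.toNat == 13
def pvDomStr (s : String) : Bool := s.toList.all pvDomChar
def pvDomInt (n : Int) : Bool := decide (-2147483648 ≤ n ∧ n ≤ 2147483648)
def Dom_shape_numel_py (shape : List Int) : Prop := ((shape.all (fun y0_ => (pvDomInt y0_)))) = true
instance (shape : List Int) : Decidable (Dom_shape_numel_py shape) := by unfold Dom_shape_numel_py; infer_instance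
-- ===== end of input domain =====

-- B replaces A's single left-to-right validation+accumulation loop by a divide-and-conquer
-- recursion on index ranges (alternative decomposition; same cost).

-- ===== PORT A =====
-- A's loop: accumulator n, early return None on a non-positive element.
def shapeNumelLoop (n : Int) : List Int → Option Int
  | [] => some n
  | d :: rest => if d ≤ 0 then none else shapeNumelLoop (n * d) rest

def shape_numel_py (shape : List Int) : Option Int :=
  if shape = [] then none else shapeNumelLoop 1 shape

-- ===== PORT B =====
-- B's helper _numel_rec: product of ds[lo:hi], splitting the range at (lo+hi)//2.
-- ds[lo] is PySem.List.pyGet? (none = IndexError, unreachable on the calls B makes).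
-- fuel (= hi - lo at the top call) only makes the recursion structural; it is never exhausted
-- on the calls B makes, since hi - lo strictly decreases on each recursive call.
def numelRec (fuel : Nat) (ds : List Int) (lo hi : Nat) : Option Int :=
  match fuel with
  | 0 => none
  | fuel + 1 =>
    if hi - lo ≤ 1 then
      match PySem.List.pyGet? ds (lo : Int) with
      | none => none
      | some d => if 0 < d then some d else none
    else
      match numelRec fuel ds lo ((lo + hi) / 2) with
      | none => none
      | some l =>
        match numelRec fuel ds ((lo + hi) / 2) hi with
        | none => none
        | some r => some (l * r)

def shape_numel_py_alt (shape : List Int) : Option Int :=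
  if shape = [] then none else numelRec shape.length shape 0 shape.length

-- ===== PRECONDITION & SPEC =====
def Spec_shape_numel_py (shape : List Int) (out : Option Int) : Prop := out = shape_numel_py_alt shape
instance (shape : List Int) (out : Option Int) : Decidable (Spec_shape_numel_py shape out) := by unfold Spec_shape_numel_py; infer_instance

-- ===== CLAIM (what is proved, stated in full; the proofs are below) =====
def Claim_equal_shape_numel_py : Prop := ∀ (shape : List Int), Dom_shape_numel_py shape → Spec_shape_numel_py shape (shape_numel_py shape)

-- ===== LEMMAS AND PROOFS =====

-- A's loop computes: all elements positive → product (times the accumulator), else none.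
theorem shapeNumelLoop_eq (l : List Int) : ∀ (n : Int),
    shapeNumelLoop n l =
      if l.all (fun d => decide (0 < d)) then some (n * l.prod) else none := by
  induction l with
  | nil => intro n; simp [shapeNumelLoop]
  | cons d rest ih =>
    intro n
    simp only [shapeNumelLoop, List.all_cons, List.prod_cons]
    by_cases h : d ≤ 0
    · simp [h, show ¬ (0 < d) by omega]
    · simp [h, show (0 < d) by omega, ih, mul_assoc]

-- B's divide-and-conquer computes the same thing on the slice ds[lo:hi].
theorem numelRec_eq (ds : List Int) : ∀ (fuel lo hi : Nat), hi - lo ≤ fuel → lo < hi → hi ≤ ds.length →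
    numelRec fuel ds lo hi =
      if ((ds.drop lo).take (hi - lo)).all (fun d => decide (0 < d))
      then some ((ds.drop lo).take (hi - lo)).prod else none := by
  intro fuel
  induction fuel with
  | zero => intro lo hi hk hlt hle; omega
  | succ fuel ih =>
    intro lo hi hk hlt hle
    rw [numelRec]
    by_cases hbase : hi - lo ≤ 1
    · have h1 : hi - lo = 1 := by omega
      have hlo : lo < ds.length := by omega
      rw [if_pos hbase, PySem.List.pyGet?_natCast, List.getElem?_eq_getElem hlo, h1]
      have ht : (ds.drop lo).take 1 = [ds[lo]] := by
        rw [List.drop_eq_getElem_cons hlo, List.take_succ_cons, List.take_zero]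
      rw [ht]
      by_cases hp : 0 < ds[lo]
      · simp [hp]
      · simp [hp]
    · rw [if_neg hbase]
      have h2 : 2 ≤ hi - lo := by omega
      have hm1 : lo < (lo + hi) / 2 := by omega
      have hm2 : (lo + hi) / 2 < hi := by omega
      generalize (lo + hi) / 2 = mid at hm1 hm2 ⊢
      rw [ih lo mid (by omega) hm1 (by omega),
          ih mid hi (by omega) hm2 hle]
      have hsplit : (ds.drop lo).take (hi - lo)
          = (ds.drop lo).take (mid - lo) ++ (ds.drop mid).take (hi - mid) := by
        have : hi - lo = (mid - lo) + (hi - mid) := by omega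
        rw [this, List.take_add, List.drop_drop]
        rw [show lo + (mid - lo) = mid from by omega]
      rw [hsplit, List.all_append, List.prod_append]
      by_cases hL : ((ds.drop lo).take (mid - lo)).all (fun d => decide (0 < d))
      · by_cases hR : ((ds.drop mid).take (hi - mid)).all (fun d => decide (0 < d))
        · simp [hL, hR]
        · simp [hL, hR]
      · simp [hL]

-- ===== VERDICT (by name: the statement is the Claim_ definition above) =====
theorem shape_numel_py_spec : Claim_equal_shape_numel_py := by
  intro shape _
  unfold Spec_shape_numel_py shape_numel_py shape_numel_py_alt
  by_cases h : shape = []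
  · simp [h]
  · have hne : 0 < shape.length := List.length_pos_iff.mpr h
    rw [if_neg h, if_neg h, shapeNumelLoop_eq,
        numelRec_eq shape shape.length 0 shape.length (by omega) hne le_rfl]
    simp
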